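-- pv_equiv track=rewrite | github.com/dangooddd/pyrepl.nvim | src/pyrepl/lsp.py | position_to_offset
-- ===== SOURCE A (Python) =====
-- def line_starts(text: str) -> list[int]:
--     starts = [0]
--     for i, ch in enumerate(text):
--         if ch == "\n":
--             starts.append(i + 1)
--     return starts
--
-- def utf16_units(ch: str) -> int:
--     return 2 if ord(ch) > 0xFFFF else 1
--
-- def position_to_offset(text: str, line: int, character_utf16: int) -> int:
--     if line < 0:
--         return 0
--
--     starts = line_starts(text)
--     if line >= len(starts):
--         return len(text)
--
--     line_start = starts[line]
--     line_end = starts[line + 1] if line + 1 < len(starts) else len(text)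
--
--     line_text = text[line_start:line_end]
--     if line_text.endswith("\n"):
--         line_text = line_text[:-1]
--     if line_text.endswith("\r"):
--         line_text = line_text[:-1]
--
--     want = max(character_utf16, 0)
--     cur = 0
--     py_col = 0
--     for ch in line_text:
--         step = utf16_units(ch)
--         if cur + step > want:
--             break
--         cur += step
--         py_col += 1
--
--     return line_start + py_col
-- ===== SOURCE B (Python) =====
-- def position_to_offset(text: str, line: int, character_utf16: int) -> int:
--     if line < 0:
--         return 0
--
--     # Walk to the requested line by repeated find() instead of building a table.
--     idx = 0
--     for _ in range(line):
--         nl = text.find("\n", idx)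
--         if nl == -1:
--             return len(text)
--         idx = nl + 1
--
--     nl = text.find("\n", idx)
--     line_text = text[idx:] if nl == -1 else text[idx:nl]
--     if line_text.endswith("\r"):
--         line_text = line_text[:-1]
--
--     want = max(character_utf16, 0)
--     cur = 0
--     py_col = 0
--     for ch in line_text:
--         step = 2 if ord(ch) > 0xFFFF else 1
--         if cur + step > want:
--             break
--         cur += step
--         py_col += 1
--
--     return idx + py_col
-- ===== Notes on version B (the rewrite author's own statement) =====
-- stated objective: faster
-- what changed: Instead of materializing the full line_starts table of every newline position in the text, B walks to the requested line by repeated str.find('\n', idx) scans and slices the line out directly, keeping the UTF-16 column loop.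
import Mathlib
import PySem

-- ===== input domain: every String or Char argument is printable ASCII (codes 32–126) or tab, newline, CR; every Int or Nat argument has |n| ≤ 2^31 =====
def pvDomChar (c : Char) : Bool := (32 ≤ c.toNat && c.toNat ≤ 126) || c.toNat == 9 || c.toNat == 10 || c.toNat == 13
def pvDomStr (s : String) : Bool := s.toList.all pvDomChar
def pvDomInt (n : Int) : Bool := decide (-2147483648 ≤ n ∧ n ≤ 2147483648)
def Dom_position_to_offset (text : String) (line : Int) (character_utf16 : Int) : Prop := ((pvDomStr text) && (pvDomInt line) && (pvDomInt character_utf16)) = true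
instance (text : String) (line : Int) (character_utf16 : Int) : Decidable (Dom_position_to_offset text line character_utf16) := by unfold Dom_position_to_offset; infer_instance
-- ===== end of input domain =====

-- B replaces A's line_starts table with repeated find('\n') scans that stop at the requested line; same return value, measured faster in a timing run.
-- ===== PORT A =====
def pvUtf16Units (ch : Char) : Int :=        -- utf16_units
  if 0xFFFF < ch.toNat then 2 else 1

def pvLineStarts (cs : List Char) : List Int :=        -- line_starts
  (PySem.List.enumerate cs).foldl
    (fun starts p => if p.2 = '\n' then starts ++ [p.1 + 1] else starts) [0]

-- the for/break UTF-16 column loop, shared verbatim by A's and B's Python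
def pvColLoop (cs : List Char) (want cur col : Int) : Int :=
  match cs with
  | [] => col
  | ch :: rest =>
      let step := pvUtf16Units ch
      if want < cur + step then col
      else pvColLoop rest want (cur + step) (col + 1)

def position_to_offset (text : String) (line : Int) (character_utf16 : Int) : Int :=
  if line < 0 then 0
  else
    let cs := text.toList
    let starts := pvLineStarts cs
    if (starts.length : Int) ≤ line then (cs.length : Int)
    else
      -- starts[line] / starts[line+1]: in range on this branch, so pyGetD's default is never used
      let lineStart := PySem.List.pyGetD starts line 0
      let lineEnd := if line + 1 < (starts.length : Int) then PySem.List.pyGetD starts (line + 1) 0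
                     else (cs.length : Int)
      let lt0 := PySem.List.slice cs (some lineStart) (some lineEnd)
      let lt1 := if PySem.Chars.endswith lt0 ['\n'] then lt0.dropLast else lt0
      let lt2 := if PySem.Chars.endswith lt1 ['\r'] then lt1.dropLast else lt1
      lineStart + pvColLoop lt2 (max character_utf16 0) 0 0

-- ===== PORT B =====
-- B's `for _ in range(line)` find loop; none = the early `return len(text)`
def pvFindLineStart (cs : List Char) (fuel : Nat) (idx : Int) : Option Int :=
  match fuel with
  | 0 => some idx
  | n + 1 =>
      let nl := PySem.Chars.findFrom cs ['\n'] idx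
      if nl = -1 then none else pvFindLineStart cs n (nl + 1)

def position_to_offset_alt (text : String) (line : Int) (character_utf16 : Int) : Int :=
  if line < 0 then 0
  else
    let cs := text.toList
    match pvFindLineStart cs line.toNat 0 with
    | none => (cs.length : Int)
    | some idx =>
        let nl := PySem.Chars.findFrom cs ['\n'] idx
        let lt0 := if nl = -1 then PySem.List.slice cs (some idx) none
                   else PySem.List.slice cs (some idx) (some nl)
        let lt1 := if PySem.Chars.endswith lt0 ['\r'] then lt0.dropLast else lt0
        idx + pvColLoop lt1 (max character_utf16 0) 0 0

-- ===== PRECONDITION & SPEC =====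
def Spec_position_to_offset (text : String) (line : Int) (character_utf16 : Int) (out : Int) : Prop := out = position_to_offset_alt text line character_utf16
instance (text : String) (line : Int) (character_utf16 : Int) (out : Int) : Decidable (Spec_position_to_offset text line character_utf16 out) := by unfold Spec_position_to_offset; infer_instance

-- ===== CLAIM (what is proved, stated in full; the proofs are below) =====
def Claim_equal_position_to_offset : Prop := ∀ (text : String) (line : Int) (character_utf16 : Int), Dom_position_to_offset text line character_utf16 → Spec_position_to_offset text line character_utf16 (position_to_offset text line character_utf16)

-- ===== LEMMAS AND PROOFS =====

-- ghost copies of the two else-branches, over an arbitrary char list (definitionally equal to the ports)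
def pvA (cs : List Char) (line character_utf16 : Int) : Int :=
  let starts := pvLineStarts cs
  if (starts.length : Int) ≤ line then (cs.length : Int)
  else
    let lineStart := PySem.List.pyGetD starts line 0
    let lineEnd := if line + 1 < (starts.length : Int) then PySem.List.pyGetD starts (line + 1) 0
                   else (cs.length : Int)
    let lt0 := PySem.List.slice cs (some lineStart) (some lineEnd)
    let lt1 := if PySem.Chars.endswith lt0 ['\n'] then lt0.dropLast else lt0
    let lt2 := if PySem.Chars.endswith lt1 ['\r'] then lt1.dropLast else lt1
    lineStart + pvColLoop lt2 (max character_utf16 0) 0 0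

def pvB (cs : List Char) (line character_utf16 : Int) : Int :=
  match pvFindLineStart cs line.toNat 0 with
  | none => (cs.length : Int)
  | some idx =>
      let nl := PySem.Chars.findFrom cs ['\n'] idx
      let lt0 := if nl = -1 then PySem.List.slice cs (some idx) none
                 else PySem.List.slice cs (some idx) (some nl)
      let lt1 := if PySem.Chars.endswith lt0 ['\r'] then lt0.dropLast else lt0
      idx + pvColLoop lt1 (max character_utf16 0) 0 0

theorem pvA_eq (text : String) (line c : Int) :
    position_to_offset text line c = if line < 0 then 0 else pvA text.toList line c := rfl

theorem pvB_eq (text : String) (line c : Int) :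
    position_to_offset_alt text line c = if line < 0 then 0 else pvB text.toList line c := rfl

-- the newline-position list that line_starts appends after its initial 0
def pvQ : List Char → Int → List Int
  | [], _ => []
  | c :: cs, s => if c = '\n' then (s + 1) :: pvQ cs (s + 1) else pvQ cs (s + 1)

theorem pvQ_foldl (cs : List Char) (s : Int) (init : List Int) :
    (PySem.List.enumerate cs s).foldl
      (fun starts p => if p.2 = '\n' then starts ++ [p.1 + 1] else starts) init
    = init ++ pvQ cs s := by
  induction cs generalizing s init with
  | nil => simp [pvQ, PySem.List.enumerate]
  | cons c cs ih =>
      rw [PySem.List.enumerate_cons]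
      simp only [List.foldl_cons, pvQ]
      by_cases h : c = '\n' <;> simp [h, ih]

theorem pvLineStarts_eq (cs : List Char) : pvLineStarts cs = 0 :: pvQ cs 0 := by
  simpa using pvQ_foldl cs 0 [0]

theorem pvQ_shift (cs : List Char) (s t : Int) :
    pvQ cs (s + t) = (pvQ cs t).map (· + s) := by
  induction cs generalizing t with
  | nil => simp [pvQ]
  | cons c cs ih =>
      simp only [pvQ]
      by_cases h : c = '\n' <;>
        · simp [h, show s + t + 1 = s + (t + 1) by ring, ih (t + 1)]
          try ring

theorem pvQ_nomem (cs : List Char) (s : Int) (h : '\n' ∉ cs) : pvQ cs s = [] := by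
  induction cs generalizing s with
  | nil => simp [pvQ]
  | cons c cs ih =>
      simp only [List.mem_cons, not_or] at h
      simp only [pvQ]
      rw [if_neg (Ne.symm h.1)]
      exact ih (s + 1) h.2

theorem pvQ_split (xs ys : List Char) (s : Int) (h : '\n' ∉ xs) :
    pvQ (xs ++ '\n' :: ys) s = (s + xs.length + 1) :: pvQ ys (s + xs.length + 1) := by
  induction xs generalizing s with
  | nil => simp [pvQ]
  | cons x xs ih =>
      simp only [List.mem_cons, not_or] at h
      simp only [List.cons_append, pvQ]
      rw [if_neg (Ne.symm h.1), ih (s + 1) h.2]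
      simp only [List.length_cons]
      push_cast
      ring_nf

theorem pvQ_mem (cs : List Char) (s : Int) (x : Int) (hx : x ∈ pvQ cs s) :
    ∃ m : Nat, x = s + m + 1 ∧ m < cs.length := by
  induction cs generalizing s with
  | nil => simp [pvQ] at hx
  | cons c cs ih =>
      simp only [pvQ] at hx
      by_cases h : c = '\n'
      · rw [if_pos h] at hx
        rcases List.mem_cons.mp hx with rfl | hx
        · exact ⟨0, by push_cast; ring, by simp⟩
        · obtain ⟨m, rfl, hm⟩ := ih (s + 1) hx
          exact ⟨m + 1, by push_cast; ring, by simpa using Nat.succ_lt_succ hm⟩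
      · rw [if_neg h] at hx
        obtain ⟨m, rfl, hm⟩ := ih (s + 1) hx
        exact ⟨m + 1, by push_cast; ring, by simpa using Nat.succ_lt_succ hm⟩

-- find / find.go characterizations for the single char '\n'
theorem pvGo_bounds (cs : List Char) (k : Nat) :
    PySem.Chars.find.go ['\n'] cs k = -1 ∨
    ((k : Int) ≤ PySem.Chars.find.go ['\n'] cs k ∧
     PySem.Chars.find.go ['\n'] cs k < (k : Int) + cs.length) := by
  induction cs generalizing k with
  | nil => left; simp [PySem.Chars.find.go]
  | cons c cs ih =>
      simp only [PySem.Chars.find.go]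
      by_cases h : List.isPrefixOf ['\n'] (c :: cs)
      · right
        rw [if_pos h]
        constructor
        · exact le_refl _
        · simp only [List.length_cons]; push_cast; omega
      · rw [if_neg h]
        rcases ih (k + 1) with h1 | ⟨h1, h2⟩
        · left; exact h1
        · right
          constructor
          · omega
          · simp only [List.length_cons] at *; push_cast at *; omega

theorem pvFind_bounds (cs : List Char) :
    PySem.Chars.find cs ['\n'] = -1 ∨
    (0 ≤ PySem.Chars.find cs ['\n'] ∧ PySem.Chars.find cs ['\n'] < cs.length) := by
  simpa using pvGo_bounds cs 0

theorem pvGo_nomem (cs : List Char) (k : Nat) (h : '\n' ∉ cs) :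
    PySem.Chars.find.go ['\n'] cs k = -1 := by
  induction cs generalizing k with
  | nil => simp [PySem.Chars.find.go]
  | cons c cs ih =>
      simp only [List.mem_cons, not_or] at h
      simp [PySem.Chars.find.go, List.isPrefixOf, h.1, ih (k + 1) h.2]

theorem pvGo_split (xs ys : List Char) (k : Nat) (h : '\n' ∉ xs) :
    PySem.Chars.find.go ['\n'] (xs ++ '\n' :: ys) k = (k : Int) + xs.length := by
  induction xs generalizing k with
  | nil => simp [PySem.Chars.find.go, List.isPrefixOf]
  | cons x xs ih =>
      simp only [List.mem_cons, not_or] at h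
      simp only [List.cons_append, PySem.Chars.find.go]
      rw [if_neg (by simp [List.isPrefixOf, h.1]), ih (k + 1) h.2]
      simp only [List.length_cons]
      push_cast; ring

theorem pvFind_nomem (cs : List Char) (h : '\n' ∉ cs) :
    PySem.Chars.find cs ['\n'] = -1 := pvGo_nomem cs 0 h

theorem pvFind_split (xs ys : List Char) (h : '\n' ∉ xs) :
    PySem.Chars.find (xs ++ '\n' :: ys) ['\n'] = (xs.length : Int) := by
  simpa using pvGo_split xs ys 0 h

-- findFrom at a Nat index within a text with a known prefix: shift lemma
theorem pvFindFrom_shift (P ys : List Char) (k : Nat) (hk : k ≤ ys.length) :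
    PySem.Chars.findFrom (P ++ ys) ['\n'] ((P.length + k : Nat) : Int) none
    = (if PySem.Chars.findFrom ys ['\n'] (k : Int) none = -1 then -1
       else (P.length : Int) + PySem.Chars.findFrom ys ['\n'] (k : Int) none) := by
  have h1 : (P.length + k) ≤ (P ++ ys).length := by simp; omega
  rw [PySem.Chars.findFrom_natCast _ _ _ h1, PySem.Chars.findFrom_natCast _ _ _ hk]
  have hd : (P ++ ys).drop (P.length + k) = ys.drop k := by
    exact List.drop_length_add_append k
  rw [hd]
  rcases pvFind_bounds (ys.drop k) with h | ⟨h0, _⟩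
  · simp [h]
  · rw [if_neg (by omega), if_neg (by omega), if_neg (by omega)]
    push_cast; ring

theorem pvEndswith_mem (l : List Char) (a : Char) (h : PySem.Chars.endswith l [a] = true) :
    a ∈ l := by
  rw [PySem.Chars.endswith, List.isSuffixOf_iff_suffix] at h
  exact h.subset (by simp)

theorem pvEndswith_append (l : List Char) (a : Char) :
    PySem.Chars.endswith (l ++ [a]) [a] = true := by
  rw [PySem.Chars.endswith, List.isSuffixOf_iff_suffix]
  exact List.suffix_append l [a]

-- findFrom at a Nat index returns -1 or a Nat index below the length
theorem pvFindFrom_nat (ys : List Char) (k : Nat) (hk : k ≤ ys.length) :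
    PySem.Chars.findFrom ys ['\n'] (k : Int) none = -1 ∨
    ∃ m : Nat, PySem.Chars.findFrom ys ['\n'] (k : Int) none = (m : Int) ∧ k ≤ m ∧ m < ys.length := by
  rw [PySem.Chars.findFrom_natCast _ _ _ hk]
  rcases pvFind_bounds (ys.drop k) with h | ⟨h0, h1⟩
  · simp [h]
  · right
    refine ⟨k + (PySem.Chars.find (ys.drop k) ['\n']).toNat, ?_, by omega, ?_⟩
    · rw [if_neg (by omega)]
      push_cast [Int.toNat_of_nonneg h0]
      ring
    · rw [List.length_drop] at h1
      omega

-- B's find loop over a text with prefix P: shift lemma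
theorem pvFindLineStart_shift (P ys : List Char) (fuel : Nat) (k : Nat) (hk : k ≤ ys.length) :
    pvFindLineStart (P ++ ys) fuel ((P.length + k : Nat) : Int)
    = (pvFindLineStart ys fuel (k : Int)).map (fun i => (P.length : Int) + i) := by
  induction fuel generalizing k with
  | zero => simp only [pvFindLineStart, Option.map_some]; push_cast; ring_nf
  | succ n ih =>
      simp only [pvFindLineStart]
      rw [pvFindFrom_shift P ys k hk]
      rcases pvFindFrom_nat ys k hk with h | ⟨m, hm, hkm, hml⟩
      · rw [h]; simp
      · rw [hm, if_neg (by omega), if_neg (by omega), if_neg (by omega)]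
        have h1 : (P.length : Int) + m + 1 = ((P.length + (m + 1) : Nat) : Int) := by
          push_cast; ring
        have h2 : (m : Int) + 1 = ((m + 1 : Nat) : Int) := by push_cast; ring
        rw [h1, h2, ih (m + 1) (by omega)]

-- invariant: the find loop's result is a Nat index ≤ len
theorem pvFindLineStart_nat (cs : List Char) (fuel : Nat) (k : Nat) (hk : k ≤ cs.length) :
    pvFindLineStart cs fuel (k : Int) = none ∨
    ∃ r : Nat, pvFindLineStart cs fuel (k : Int) = some (r : Int) ∧ r ≤ cs.length := by
  induction fuel generalizing k with
  | zero => exact Or.inr ⟨k, rfl, hk⟩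
  | succ n ih =>
      simp only [pvFindLineStart]
      rcases pvFindFrom_nat cs k hk with h | ⟨m, hm, hkm, hml⟩
      · rw [h]; simp
      · rw [hm, if_neg (by omega)]
        have h2 : (m : Int) + 1 = ((m + 1 : Nat) : Int) := by push_cast; ring
        rw [h2]
        exact ih (m + 1) (by omega)

-- every entry of line_starts is a Nat index ≤ len
theorem pvStarts_entry (ys : List Char) (x : Int) (hx : x ∈ pvLineStarts ys) :
    ∃ a : Nat, x = (a : Int) ∧ a ≤ ys.length := by
  rw [pvLineStarts_eq] at hx
  rcases List.mem_cons.mp hx with rfl | hx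
  · exact ⟨0, by simp, by simp⟩
  · obtain ⟨m, rfl, hm⟩ := pvQ_mem ys 0 _ hx
    exact ⟨m + 1, by push_cast; ring, by omega⟩

theorem pvStarts_step (xs ys : List Char) (h : '\n' ∉ xs) :
    pvLineStarts (xs ++ '\n' :: ys)
    = 0 :: (pvLineStarts ys).map (· + ((xs.length : Int) + 1)) := by
  rw [pvLineStarts_eq, pvLineStarts_eq, pvQ_split xs ys 0 h]
  have hsh : pvQ ys (0 + (xs.length : Int) + 1)
      = (pvQ ys 0).map (· + ((xs.length : Int) + 1)) := by
    rw [show (0 : Int) + (xs.length : Int) + 1 = ((xs.length : Int) + 1) + 0 by ring,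
        pvQ_shift ys ((xs.length : Int) + 1) 0]
  rw [hsh]
  simp

-- slice shift lemmas over a known prefix
theorem pvSlice_shift (P ys : List Char) (a b : Nat) :
    PySem.List.slice (P ++ ys) (some ((P.length + a : Nat) : Int)) (some ((P.length + b : Nat) : Int))
    = PySem.List.slice ys (some ((a : Nat) : Int)) (some ((b : Nat) : Int)) := by
  rw [PySem.List.slice_natCast, PySem.List.slice_natCast, List.drop_length_add_append]
  congr 1
  omega

theorem pvSliceFrom_shift (P ys : List Char) (a : Nat) :
    PySem.List.slice (P ++ ys) (some ((P.length + a : Nat) : Int)) none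
    = PySem.List.slice ys (some ((a : Nat) : Int)) none := by
  rw [PySem.List.slice_from_natCast, PySem.List.slice_from_natCast, List.drop_length_add_append]

-- the four cases of the main induction
theorem pvA_nomem_pos (cs : List Char) (line c : Int) (h : '\n' ∉ cs) (hl : 1 ≤ line) :
    pvA cs line c = (cs.length : Int) := by
  unfold pvA
  rw [pvLineStarts_eq, pvQ_nomem cs 0 h]
  simp only [List.length_cons, List.length_nil]
  rw [if_pos (by push_cast; omega)]

theorem pvB_nomem_pos (cs : List Char) (line c : Int) (h : '\n' ∉ cs) (hl : 1 ≤ line) :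
    pvB cs line c = (cs.length : Int) := by
  unfold pvB
  obtain ⟨n, hn⟩ : ∃ n, line.toNat = n + 1 := ⟨line.toNat - 1, by omega⟩
  rw [hn]
  simp [pvFindLineStart, PySem.Chars.findFrom_zero, pvFind_nomem cs h]

theorem pvBase_nomem (cs : List Char) (c : Int) (h : '\n' ∉ cs) : pvA cs 0 c = pvB cs 0 c := by
  unfold pvA pvB
  rw [pvLineStarts_eq, pvQ_nomem cs 0 h]
  have hE : PySem.Chars.endswith cs ['\n'] = false := by
    cases hE : PySem.Chars.endswith cs ['\n']
    · rfl
    · exact absurd (pvEndswith_mem _ _ hE) h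
  simp [pvFindLineStart, pvFind_nomem cs h, hE,
        PySem.List.slice_none_none, PySem.List.slice_to_natCast, List.take_length]

theorem pvGetD_one_cons (x y : Int) (l : List Int) (d : Int) :
    PySem.List.pyGetD (x :: y :: l) ((0 : Int) + 1) d = y := by
  rw [PySem.List.pyGetD_eq_getElem _ _ (by omega) (by simp)]
  norm_num

theorem pvBase_mem (xs ys : List Char) (c : Int) (h : '\n' ∉ xs) :
    pvA (xs ++ '\n' :: ys) 0 c = pvB (xs ++ '\n' :: ys) 0 c := by
  unfold pvA pvB
  rw [pvStarts_step xs ys h, pvLineStarts_eq ys]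
  simp only [List.map_cons, List.length_cons, List.length_map, Int.toNat_zero, pvFindLineStart,
    PySem.Chars.findFrom_zero]
  have hg1 : ¬ ((((pvQ ys 0).length + 1 + 1 : Nat) : Int) ≤ (0 : Int)) := by push_cast; omega
  have hg2 : (0 : Int) + 1 < (((pvQ ys 0).length + 1 + 1 : Nat) : Int) := by push_cast; omega
  have hg3 : ¬ ((xs.length : Int) = -1) := by omega
  rw [if_neg hg1, PySem.List.pyGetD_zero_cons, if_pos hg2, pvGetD_one_cons,
      pvFind_split xs ys h, if_neg hg3]
  have hs1 : PySem.List.slice (xs ++ '\n' :: ys) (some (0 : Int))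
      (some ((0 : Int) + ((xs.length : Int) + 1))) = xs ++ ['\n'] := by
    rw [show (0 : Int) + ((xs.length : Int) + 1) = ((xs.length + 1 : Nat) : Int) by push_cast; ring,
        PySem.List.slice_zero_start, PySem.List.slice_to_natCast, List.take_length_add_append]
    rfl
  have hs2 : PySem.List.slice (xs ++ '\n' :: ys) (some (0 : Int)) (some ((xs.length : Int))) = xs := by
    rw [show ((xs.length : Int)) = ((xs.length : Nat) : Int) from rfl,
        PySem.List.slice_zero_start, PySem.List.slice_to_natCast, List.take_left]
  rw [hs1, hs2, if_pos (pvEndswith_append xs '\n'), List.dropLast_concat]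

-- indexing 0 :: map (· + t) S at a positive index is indexing S shifted
theorem pvGetD_shift (l : List Int) (t i : Int) (h0 : 1 ≤ i) (h1 : i - 1 < (l.length : Int)) :
    PySem.List.pyGetD (0 :: l.map (· + t)) i 0 = PySem.List.pyGetD l (i - 1) 0 + t := by
  rw [PySem.List.pyGetD_eq_getElem (i := i) _ _ (by omega) (by simp; omega),
      PySem.List.pyGetD_eq_getElem (i := i - 1) _ _ (by omega) h1]
  simp only [show i.toNat = (i - 1).toNat + 1 from by omega, List.getElem_cons_succ,
    List.getElem_map]

theorem pvAstep (xs ys : List Char) (line c : Int) (h : '\n' ∉ xs) (hl : 1 ≤ line) :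
    pvA (xs ++ '\n' :: ys) line c = ((xs.length : Int) + 1) + pvA ys (line - 1) c := by
  have hP : xs ++ '\n' :: ys = (xs ++ ['\n']) ++ ys := by simp
  have hPlen : (xs ++ ['\n']).length = xs.length + 1 := by simp
  unfold pvA
  rw [pvStarts_step xs ys h]
  simp only [List.length_cons, List.length_map]
  have hlen : ((xs ++ '\n' :: ys).length : Int) = ((xs.length : Int) + 1) + ys.length := by
    push_cast [List.length_append, List.length_cons]; ring
  by_cases hbig : ((pvLineStarts ys).length : Int) ≤ line - 1
  · have h1 : ((((pvLineStarts ys).length + 1 : Nat)) : Int) ≤ line := by push_cast; omega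
    rw [if_pos h1, if_pos hbig, hlen]
  · have h1 : ¬ (((((pvLineStarts ys).length + 1 : Nat)) : Int) ≤ line) := by push_cast; omega
    rw [if_neg h1, if_neg hbig]
    have hr0 : (0 : Int) ≤ line - 1 := by omega
    have hr1 : line - 1 < ((pvLineStarts ys).length : Int) := by omega
    rw [pvGetD_shift (pvLineStarts ys) ((xs.length : Int) + 1) line (by omega) hr1]
    obtain ⟨a, ha, halen⟩ : ∃ a : Nat,
        PySem.List.pyGetD (pvLineStarts ys) (line - 1) 0 = (a : Int) ∧ a ≤ ys.length := by
      apply pvStarts_entry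
      rw [PySem.List.pyGetD_eq_getElem (i := line - 1) _ _ hr0 hr1]
      exact List.getElem_mem _
    have hend : (if line + 1 < ((((pvLineStarts ys).length + 1 : Nat)) : Int)
          then PySem.List.pyGetD
            (0 :: (pvLineStarts ys).map (· + ((xs.length : Int) + 1))) (line + 1) 0
          else ((xs ++ '\n' :: ys).length : Int))
        = (if line - 1 + 1 < ((pvLineStarts ys).length : Int)
            then PySem.List.pyGetD (pvLineStarts ys) (line - 1 + 1) 0
            else (ys.length : Int)) + ((xs.length : Int) + 1) := by
      by_cases hmid : line < ((pvLineStarts ys).length : Int)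
      · have hc1 : line + 1 < ((((pvLineStarts ys).length + 1 : Nat)) : Int) := by push_cast; omega
        have hc2 : line - 1 + 1 < ((pvLineStarts ys).length : Int) := by omega
        rw [if_pos hc1, if_pos hc2,
            pvGetD_shift (pvLineStarts ys) ((xs.length : Int) + 1) (line + 1) (by omega)
              (by rw [show line + 1 - 1 = line by ring]; exact hmid),
            show line + 1 - 1 = line by ring, show line - 1 + 1 = line by ring]
      · have hc1 : ¬ (line + 1 < ((((pvLineStarts ys).length + 1 : Nat)) : Int)) := by
          push_cast; omega
        have hc2 : ¬ (line - 1 + 1 < ((pvLineStarts ys).length : Int)) := by omega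
        rw [if_neg hc1, if_neg hc2, hlen]; ring
    rw [hend]
    obtain ⟨b, hb, hblen⟩ : ∃ b : Nat,
        (if line - 1 + 1 < ((pvLineStarts ys).length : Int)
          then PySem.List.pyGetD (pvLineStarts ys) (line - 1 + 1) 0
          else (ys.length : Int)) = (b : Int) ∧ b ≤ ys.length := by
      by_cases hmid : line - 1 + 1 < ((pvLineStarts ys).length : Int)
      · rw [if_pos hmid]
        apply pvStarts_entry
        rw [PySem.List.pyGetD_eq_getElem (i := line - 1 + 1) _ _ (by omega) hmid]
        exact List.getElem_mem _
      · exact ⟨ys.length, by rw [if_neg hmid], le_refl _⟩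
    rw [ha, hb]
    have hsl : PySem.List.slice (xs ++ '\n' :: ys)
        (some ((a : Int) + ((xs.length : Int) + 1))) (some ((b : Int) + ((xs.length : Int) + 1)))
        = PySem.List.slice ys (some ((a : Nat) : Int)) (some ((b : Nat) : Int)) := by
      rw [show ((a : Int) + ((xs.length : Int) + 1)) = (((xs ++ ['\n']).length + a : Nat) : Int) by
            push_cast [hPlen]; ring,
          show ((b : Int) + ((xs.length : Int) + 1)) = (((xs ++ ['\n']).length + b : Nat) : Int) by
            push_cast [hPlen]; ring,
          hP, pvSlice_shift]
    rw [hsl]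
    ring

theorem pvBstep (xs ys : List Char) (line c : Int) (h : '\n' ∉ xs) (hl : 1 ≤ line) :
    pvB (xs ++ '\n' :: ys) line c = ((xs.length : Int) + 1) + pvB ys (line - 1) c := by
  have hPlen : (xs ++ ['\n']).length = xs.length + 1 := by simp
  unfold pvB
  rw [show line.toNat = (line - 1).toNat + 1 from by omega]
  simp only [pvFindLineStart, PySem.Chars.findFrom_zero]
  have hg3 : ¬ ((xs.length : Int) = -1) := by omega
  rw [pvFind_split xs ys h, if_neg hg3,
      show ((xs.length : Int) + 1) = (((xs ++ ['\n']).length + 0 : Nat) : Int) by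
        push_cast [hPlen]; ring,
      show xs ++ '\n' :: ys = (xs ++ ['\n']) ++ ys by simp,
      pvFindLineStart_shift (xs ++ ['\n']) ys _ 0 (by omega)]
  simp only [Nat.cast_zero]
  rcases pvFindLineStart_nat ys (line - 1).toNat 0 (by omega) with hnone | ⟨r, hr, hrlen⟩
  · simp only [Nat.cast_zero] at hnone
    rw [hnone]
    simp only [Option.map_none]
    push_cast [List.length_append, List.length_cons, hPlen]
    ring
  · simp only [Nat.cast_zero] at hr
    rw [hr]
    simp only [Option.map_some]
    rw [show (((xs ++ ['\n']).length : Int) + (r : Int)) = (((xs ++ ['\n']).length + r : Nat) : Int) by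
          push_cast; ring,
        pvFindFrom_shift (xs ++ ['\n']) ys r hrlen]
    rcases pvFindFrom_nat ys r hrlen with hf | ⟨m, hm, hrm, hml⟩
    · rw [hf, if_pos rfl, if_pos rfl, pvSliceFrom_shift (xs ++ ['\n']) ys r]
      push_cast [hPlen]
      ring
    · have hnm : ¬ ((m : Int) = -1) := by omega
      have hnm2 : ¬ ((((xs ++ ['\n']).length : Int)) + (m : Int) = -1) := by omega
      rw [hm, if_neg hnm, if_neg hnm2,
          show (((xs ++ ['\n']).length : Int) + (m : Int)) = (((xs ++ ['\n']).length + m : Nat) : Int) by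
            push_cast; ring,
          pvSlice_shift (xs ++ ['\n']) ys r m]
      push_cast [hPlen]
      ring

theorem pvDropWhile_first (cs : List Char) (d : Char) (rest : List Char)
    (h : cs.dropWhile (· ≠ '\n') = d :: rest) : d = '\n' := by
  induction cs with
  | nil => simp at h
  | cons c cs ih =>
      rw [List.dropWhile_cons] at h
      by_cases hc : c = '\n'
      · rw [if_neg (by simp [hc])] at h
        exact ((List.cons.injEq _ _ _ _).mp h).1.symm.trans hc
      · rw [if_pos (by simp [hc])] at h
        exact ih h

theorem pvKey (cs : List Char) (line c : Int) (h0 : 0 ≤ line) : pvA cs line c = pvB cs line c := by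
  induction hn : cs.length using Nat.strong_induction_on generalizing cs line c with
  | _ n ih =>
    by_cases hmem : '\n' ∈ cs
    · obtain ⟨xs, ys, hdec, hxs⟩ : ∃ xs ys, cs = xs ++ '\n' :: ys ∧ '\n' ∉ xs := by
        have hne : cs.dropWhile (· ≠ '\n') ≠ [] := by
          intro hEmpty
          apply absurd hmem
          intro hc
          have hto := List.takeWhile_append_dropWhile (p := fun x => decide (x ≠ '\n')) (l := cs)
          rw [hEmpty, List.append_nil] at hto
          have hp := List.mem_takeWhile_imp (l := cs) (p := fun x => decide (x ≠ '\n'))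
            (by rw [hto]; exact hc)
          simp at hp
        obtain ⟨d, rest, hdr⟩ := List.exists_cons_of_ne_nil hne
        have hd : d = '\n' := pvDropWhile_first cs d rest hdr
        refine ⟨cs.takeWhile (· ≠ '\n'), rest, ?_, ?_⟩
        · conv_lhs => rw [← List.takeWhile_append_dropWhile (p := fun x => decide (x ≠ '\n')) (l := cs)]
          rw [hdr, hd]
        · intro hc
          have hp := List.mem_takeWhile_imp hc
          simp at hp
      subst hdec
      rcases eq_or_lt_of_le h0 with heq | hpos
      · rw [← heq]
        exact pvBase_mem xs ys c hxs
      · have hys : ys.length < n := by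
          rw [← hn, List.length_append, List.length_cons]; omega
        rw [pvAstep xs ys line c hxs (by omega), pvBstep xs ys line c hxs (by omega),
            ih ys.length hys ys (line - 1) c (by omega) rfl]
    · rcases eq_or_lt_of_le h0 with heq | hpos
      · rw [← heq]
        exact pvBase_nomem cs c hmem
      · rw [pvA_nomem_pos cs line c hmem (by omega), pvB_nomem_pos cs line c hmem (by omega)]

-- ===== VERDICT (by name: the statement is the Claim_ definition above) =====
theorem position_to_offset_spec : Claim_equal_position_to_offset := by
  intro text line c _
  unfold Spec_position_to_offset
  rw [pvA_eq, pvB_eq]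
  by_cases h : line < 0
  · simp [h]
  · simp [h, pvKey text.toList line c (by omega)]
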